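-- pv_equiv track=rewrite | github.com/daniel-reich/ubiquitous-fiesta | kiX7WjSFeTmBYcEgK_5.py | major_sum
-- ===== SOURCE A (Python) =====
-- def major_sum(lst):
--     pos = neg = zero = 0
--     for i in lst:
--         if i > 0:
--             pos += i
--         elif i < 0:
--             neg += i
--         else:
--             zero += 1
--     return max((pos, neg, zero), key=abs)
-- ===== SOURCE B (Python) =====
-- def major_sum(lst):
--     pos = sum(i for i in lst if i > 0)
--     neg = sum(i for i in lst if i < 0)
--     zero = lst.count(0)
--     return max((pos, neg, zero), key=abs)
-- ===== Notes on version B (the rewrite author's own statement) =====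
-- stated objective: alternative
-- what changed: Replaces the single branching loop with three accumulators by three independent aggregates (sum of positives, sum of negatives, count of zeros via filtered passes / list.count), then the same max-by-abs selection.
import Mathlib
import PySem

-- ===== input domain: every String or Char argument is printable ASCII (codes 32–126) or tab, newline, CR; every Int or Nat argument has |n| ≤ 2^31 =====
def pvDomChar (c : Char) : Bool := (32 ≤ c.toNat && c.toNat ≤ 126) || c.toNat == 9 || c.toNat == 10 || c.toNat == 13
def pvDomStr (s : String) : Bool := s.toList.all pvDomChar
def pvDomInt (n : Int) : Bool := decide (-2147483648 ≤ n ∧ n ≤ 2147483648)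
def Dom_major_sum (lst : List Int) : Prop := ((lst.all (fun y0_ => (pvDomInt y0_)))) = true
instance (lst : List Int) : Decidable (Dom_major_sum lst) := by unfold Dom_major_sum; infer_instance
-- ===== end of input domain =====

-- B replaces A's single branching loop by three independent filtered aggregates; same max-by-abs selection.

-- Python's max((a,b,c), key=abs): first element of maximal absolute value (a later
-- element replaces the current best only when strictly larger in abs).
def pyMaxAbs3 (a b c : Int) : Int :=
  let m := a
  let m := if b.natAbs > m.natAbs then b else m
  if c.natAbs > m.natAbs then c else m

-- ===== PORT A =====
def major_sum (lst : List Int) : Int :=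
  let s := lst.foldl (fun (s : Int × Int × Int) i =>
    if i > 0 then (s.1 + i, s.2.1, s.2.2)
    else if i < 0 then (s.1, s.2.1 + i, s.2.2)
    else (s.1, s.2.1, s.2.2 + 1)) (0, 0, 0)
  pyMaxAbs3 s.1 s.2.1 s.2.2

-- ===== PORT B =====
def major_sum_alt (lst : List Int) : Int :=
  let pos := ((lst.filter (fun i => i > 0)).map id).sum
  let neg := ((lst.filter (fun i => i < 0)).map id).sum
  let zero : Int := PySem.List.count lst 0
  pyMaxAbs3 pos neg zero

-- ===== PRECONDITION & SPEC =====
def Spec_major_sum (lst : List Int) (out : Int) : Prop := out = major_sum_alt lst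
instance (lst : List Int) (out : Int) : Decidable (Spec_major_sum lst out) := by unfold Spec_major_sum; infer_instance

-- ===== CLAIM (what is proved, stated in full; the proofs are below) =====
def Claim_equal_major_sum : Prop := ∀ (lst : List Int), Dom_major_sum lst → Spec_major_sum lst (major_sum lst)

-- ===== LEMMAS AND PROOFS =====
theorem major_sum_fold_eq (lst : List Int) (p n z : Int) :
    lst.foldl (fun (s : Int × Int × Int) i =>
      if i > 0 then (s.1 + i, s.2.1, s.2.2)
      else if i < 0 then (s.1, s.2.1 + i, s.2.2)
      else (s.1, s.2.1, s.2.2 + 1)) (p, n, z)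
    = (p + ((lst.filter (fun i => i > 0)).map id).sum,
       n + ((lst.filter (fun i => i < 0)).map id).sum,
       z + (PySem.List.count lst 0 : Int)) := by
  induction lst generalizing p n z with
  | nil => simp [PySem.List.count]
  | cons a t ih =>
    by_cases h1 : a > 0
    · have h2 : ¬ a < 0 := by omega
      have h3 : ¬ (a == 0) = true := by simp; omega
      simp [List.foldl, h1, h2, ih, List.filter, PySem.List.count, List.count_cons, h3]
      ring
    · by_cases h2 : a < 0
      · have h3 : ¬ (a == 0) = true := by simp; omega
        simp [List.foldl, h1, h2, ih, List.filter, PySem.List.count, List.count_cons, h3]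
        ring
      · have h3 : (a == 0) = true := by simp; omega
        simp [List.foldl, h1, h2, ih, List.filter, PySem.List.count, List.count_cons, h3]
        push_cast
        ring

-- ===== VERDICT (by name: the statement is the Claim_ definition above) =====
theorem major_sum_spec : Claim_equal_major_sum := by
  intro lst _
  unfold Spec_major_sum major_sum major_sum_alt
  simp only [major_sum_fold_eq, zero_add]
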